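-- pv_equiv track=rewrite | github.com/japan1988/multi-agent-mediation | tests/test_mediation_emergency_contract_sim_v4_1.py | _find_rows
-- ===== SOURCE A (Python) =====
-- def _find_rows(arl, layer=None, reason_code=None, decision=None):
--     out = []
--     for r in arl:
--         if layer is not None and r["layer"] != layer:
--             continue
--         if reason_code is not None and r["reason_code"] != reason_code:
--             continue
--         if decision is not None and r["decision"] != decision:
--             continue
--         out.append(r)
--     return out
-- ===== SOURCE B (Python) =====
-- def _find_rows(arl, layer=None, reason_code=None, decision=None):
--     # Staged filtering: each active criterion is applied as its own pass,
--     # successively narrowing the surviving rows.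
--     rows = list(arl)
--     for key, val in (("layer", layer),
--                      ("reason_code", reason_code),
--                      ("decision", decision)):
--         if val is not None:
--             rows = [r for r in rows if r[key] == val]
--     return rows
-- ===== Notes on version B (the rewrite author's own statement) =====
-- stated objective: alternative
-- what changed: B replaces A's single pass with three continue-guards by staged filtering: each active criterion is applied as its own separate pass over the progressively narrowed row list.
import Mathlib
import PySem

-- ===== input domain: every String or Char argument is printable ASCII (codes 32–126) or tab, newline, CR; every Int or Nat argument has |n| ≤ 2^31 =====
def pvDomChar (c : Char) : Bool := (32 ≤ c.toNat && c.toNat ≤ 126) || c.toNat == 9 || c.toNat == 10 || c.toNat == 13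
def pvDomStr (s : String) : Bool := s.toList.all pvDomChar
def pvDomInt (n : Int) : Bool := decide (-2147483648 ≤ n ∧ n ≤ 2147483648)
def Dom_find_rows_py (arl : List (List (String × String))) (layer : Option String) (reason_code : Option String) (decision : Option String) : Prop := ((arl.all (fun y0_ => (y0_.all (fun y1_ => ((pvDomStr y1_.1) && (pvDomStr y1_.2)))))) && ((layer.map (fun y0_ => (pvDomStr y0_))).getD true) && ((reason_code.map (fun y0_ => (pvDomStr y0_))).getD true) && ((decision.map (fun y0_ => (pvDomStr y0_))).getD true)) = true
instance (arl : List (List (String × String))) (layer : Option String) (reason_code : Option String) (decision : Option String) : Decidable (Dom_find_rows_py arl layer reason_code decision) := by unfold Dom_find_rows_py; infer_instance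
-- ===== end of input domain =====

-- B applies each active criterion as its own filtering pass over the progressively narrowed row list,
-- instead of A's single pass with three continue-guards (objective: alternative; same behaviour, KeyError inputs excluded by Pre_).


-- shared primitive: Python r[k] on a dict given as assoc list (first match);
-- inside Pre_ the key is always present, the "" default is never consulted there.
def pvRowGet (r : List (String × String)) (k : String) : String :=
  ((PySem.Dict.mk r).get? k).getD ""

-- ===== PORT A =====
-- the per-row body of A's loop: the three continue-guards in source order
def pvKeepA (layer reason_code decision : Option String) (r : List (String × String)) : Bool :=
  match layer with
  | some l => if pvRowGet r "layer" ≠ l then false else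
      match reason_code with
      | some rc => if pvRowGet r "reason_code" ≠ rc then false else
          match decision with
          | some d => if pvRowGet r "decision" ≠ d then false else true
          | none => true
      | none =>
          match decision with
          | some d => if pvRowGet r "decision" ≠ d then false else true
          | none => true
  | none =>
      match reason_code with
      | some rc => if pvRowGet r "reason_code" ≠ rc then false else
          match decision with
          | some d => if pvRowGet r "decision" ≠ d then false else true
          | none => true
      | none =>
          match decision with
          | some d => if pvRowGet r "decision" ≠ d then false else true
          | none => true

def find_rows_py (arl : List (List (String × String))) (layer : Option String) (reason_code : Option String) (decision : Option String) : List (List (String × String)) :=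
  arl.foldl (fun out r => if pvKeepA layer reason_code decision r then out ++ [r] else out) []

-- ===== PORT B =====
-- one narrowing pass of B: if the criterion is active, filter the surviving rows by it
def pvStage (rows : List (List (String × String))) (kv : String × Option String) :
    List (List (String × String)) :=
  match kv.2 with
  | some v => rows.filter (fun r => pvRowGet r kv.1 == v)
  | none => rows

def find_rows_py_alt (arl : List (List (String × String))) (layer : Option String) (reason_code : Option String) (decision : Option String) : List (List (String × String)) :=
  ([("layer", layer), ("reason_code", reason_code), ("decision", decision)] :
      List (String × Option String)).foldl pvStage arl

-- ===== PRECONDITION & SPEC =====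
-- whether the layer (resp. reason_code) guard lets the row through — determines which keys A accesses
def pvPassL (layer : Option String) (r : List (String × String)) : Bool :=
  match layer with | none => true | some l => (PySem.Dict.mk r).get? "layer" == some l
def pvPassR (reason_code : Option String) (r : List (String × String)) : Bool :=
  match reason_code with | none => true | some rc => (PySem.Dict.mk r).get? "reason_code" == some rc

-- Pre_ excludes exactly the inputs on which Python A raises KeyError: some row is missing the key
-- of an active filter at the moment A would access it (both Pythons raise there).
def Pre_find_rows_py (arl : List (List (String × String))) (layer : Option String) (reason_code : Option String) (decision : Option String) : Prop :=
  (arl.all (fun r =>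
    (layer.isNone || ((PySem.Dict.mk r).get? "layer").isSome) &&
    (!(pvPassL layer r) || reason_code.isNone || ((PySem.Dict.mk r).get? "reason_code").isSome) &&
    (!(pvPassL layer r && pvPassR reason_code r) || decision.isNone || ((PySem.Dict.mk r).get? "decision").isSome))) = true
instance (arl : List (List (String × String))) (layer : Option String) (reason_code : Option String) (decision : Option String) : Decidable (Pre_find_rows_py arl layer reason_code decision) := by unfold Pre_find_rows_py; infer_instance

def pvWitness_find_rows_py : (List (List (String × String))) × Option String × Option String × Option String :=
  ([[("layer", "L1"), ("reason_code", "R1"), ("decision", "allow")],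
    [("layer", "L2"), ("reason_code", "R1"), ("decision", "deny")]], some "L1", none, some "allow")

def Spec_find_rows_py (arl : List (List (String × String))) (layer : Option String) (reason_code : Option String) (decision : Option String) (out : List (List (String × String))) : Prop := out = find_rows_py_alt arl layer reason_code decision
instance (arl : List (List (String × String))) (layer : Option String) (reason_code : Option String) (decision : Option String) (out : List (List (String × String))) : Decidable (Spec_find_rows_py arl layer reason_code decision out) := by unfold Spec_find_rows_py; infer_instance

-- ===== CLAIM (what is proved, stated in full; the proofs are below) =====
def Claim_equal_find_rows_py : Prop := ∀ (arl : List (List (String × String))) (layer : Option String) (reason_code : Option String) (decision : Option String), Dom_find_rows_py arl layer reason_code decision → Pre_find_rows_py arl layer reason_code decision → Spec_find_rows_py arl layer reason_code decision (find_rows_py arl layer reason_code decision)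

-- ===== LEMMAS AND PROOFS =====

theorem pvFoldl_filter (p : List (String × String) → Bool)
    (arl : List (List (String × String))) (acc : List (List (String × String))) :
    arl.foldl (fun out r => if p r then out ++ [r] else out) acc = acc ++ arl.filter p := by
  induction arl generalizing acc with
  | nil => simp
  | cons r t ih =>
    by_cases h : p r <;> simp [List.foldl, h, ih, List.filter]

-- A's single-pass guard chain equals B's staged filter chain
theorem pvStaged_eq (layer reason_code decision : Option String)
    (arl : List (List (String × String))) :
    arl.filter (pvKeepA layer reason_code decision)
      = find_rows_py_alt arl layer reason_code decision := by
  unfold find_rows_py_alt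
  cases layer <;> cases reason_code <;> cases decision <;>
    simp only [List.foldl, pvStage, List.filter_filter] <;>
    first
    | simp [pvKeepA]
    | (congr 1
       funext r
       simp [pvKeepA]
       rw [Bool.eq_iff_iff]
       simp
       try tauto)

theorem pvWitness_ok : Dom_find_rows_py pvWitness_find_rows_py.1 pvWitness_find_rows_py.2.1
    pvWitness_find_rows_py.2.2.1 pvWitness_find_rows_py.2.2.2 ∧
    Pre_find_rows_py pvWitness_find_rows_py.1 pvWitness_find_rows_py.2.1
    pvWitness_find_rows_py.2.2.1 pvWitness_find_rows_py.2.2.2 := by decide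

-- ===== VERDICT (by name: the statement is the Claim_ definition above) =====
theorem find_rows_py_spec : Claim_equal_find_rows_py := by
  intro arl layer reason_code decision _ _
  unfold Spec_find_rows_py find_rows_py
  rw [pvFoldl_filter]
  simp only [List.nil_append]
  exact pvStaged_eq layer reason_code decision arl
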